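-- pv_equiv track=rewrite | github.com/evildarkarchon/Scanner111 | Code to Port/ClassicLib/ScanLog/DetectMods.py | detect_mods_single
-- ===== SOURCE A (Python) =====
-- def _convert_to_lowercase(data: dict[str, str]) -> dict[str, str]:
--     """Convert dictionary keys to lowercase for case-insensitive comparisons."""
--     return {key.lower(): value for key, value in data.items()}
--
-- def _validate_warning(mod_name: str, warning: str) -> None:
--     """Validate that a mod has an associated warning message."""
--     if not warning:
--         raise ValueError(f"ERROR: {mod_name} has no warning in the database!")
--
-- def detect_mods_single(yaml_dict: dict[str, str], crashlog_plugins: dict[str, str], autoscan_report: list[str]) -> bool: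
--     """
--     Detects modifications (mods) based on provided YAML dictionary, crashlog plugins, and updates the
--     autoscan report accordingly.
--
--     This function checks if any mod names from the YAML dictionary exist in the crashlog plugins. If a match is found, it
--     will append the respective plugin's identifier and a warning message to the autoscan report.
--
--     Args:
--         yaml_dict (dict[str, str]): A mapping of mod names (as keys) to their respective warnings (as values).
--         crashlog_plugins (dict[str, str]): A mapping of plugin names (as keys) to their corresponding identifiers
--             (as values).
--         autoscan_report (list[str]): A collection of strings that the function updates to log findings based on the match
--             results.
--
--     Returns:
--         bool: True if at least one mod was detected in the crashlog plugins; otherwise, False.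
--
--     Raises:
--         ValueError: If a mod from the YAML dictionary has no warning defined and is found in the crashlog plugins.
--     """
--     mods_found = False
--     yaml_dict_lower: dict[str, str] = _convert_to_lowercase(yaml_dict)
--     crashlog_plugins_lower: dict[str, str] = _convert_to_lowercase(crashlog_plugins)
--
--     for mod_name, mod_warning in yaml_dict_lower.items():
--         for plugin_name, plugin_id in crashlog_plugins_lower.items():
--             if mod_name in plugin_name:
--                 _validate_warning(mod_name, mod_warning)
--                 autoscan_report.extend((f"[!] FOUND : [{plugin_id}] ", mod_warning))
--                 mods_found = True
--                 break
--
--     return mods_found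
-- ===== SOURCE B (Python) =====
-- def detect_mods_single(yaml_dict: dict[str, str], crashlog_plugins: dict[str, str], autoscan_report: list[str]) -> bool:
--     """Inverted-loop re-implementation: walk the plugins once (outer), recording for
--     every mod the id of the first plugin whose name contains it, then emit the report
--     in one pass over the mods.  Same return value and same mutation of autoscan_report."""
--     mods_lower = {key.lower(): value for key, value in yaml_dict.items()}
--     plugins_lower = {key.lower(): value for key, value in crashlog_plugins.items()}
--
--     first_match: dict[str, str] = {}
--     for plugin_name, plugin_id in plugins_lower.items():
--         for mod_name in mods_lower:
--             if mod_name not in first_match and mod_name in plugin_name: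
--                 first_match[mod_name] = plugin_id
--
--     mods_found = False
--     for mod_name, mod_warning in mods_lower.items():
--         if mod_name in first_match:
--             if not mod_warning:
--                 raise ValueError(f"ERROR: {mod_name} has no warning in the database!")
--             autoscan_report.extend((f"[!] FOUND : [{first_match[mod_name]}] ", mod_warning))
--             mods_found = True
--     return mods_found
-- ===== Notes on version B (the rewrite author's own statement) =====
-- stated objective: alternative
-- what changed: Inverts the loop nesting: instead of scanning all plugins for each mod (inner scan with break), B walks the plugins once, building a first-match dict from mod name to the id of the first plugin containing it, then emits the report and the result in a single pass over the mods; requires a proof that the traversal order does not change which plugin matches first.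
import Mathlib
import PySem

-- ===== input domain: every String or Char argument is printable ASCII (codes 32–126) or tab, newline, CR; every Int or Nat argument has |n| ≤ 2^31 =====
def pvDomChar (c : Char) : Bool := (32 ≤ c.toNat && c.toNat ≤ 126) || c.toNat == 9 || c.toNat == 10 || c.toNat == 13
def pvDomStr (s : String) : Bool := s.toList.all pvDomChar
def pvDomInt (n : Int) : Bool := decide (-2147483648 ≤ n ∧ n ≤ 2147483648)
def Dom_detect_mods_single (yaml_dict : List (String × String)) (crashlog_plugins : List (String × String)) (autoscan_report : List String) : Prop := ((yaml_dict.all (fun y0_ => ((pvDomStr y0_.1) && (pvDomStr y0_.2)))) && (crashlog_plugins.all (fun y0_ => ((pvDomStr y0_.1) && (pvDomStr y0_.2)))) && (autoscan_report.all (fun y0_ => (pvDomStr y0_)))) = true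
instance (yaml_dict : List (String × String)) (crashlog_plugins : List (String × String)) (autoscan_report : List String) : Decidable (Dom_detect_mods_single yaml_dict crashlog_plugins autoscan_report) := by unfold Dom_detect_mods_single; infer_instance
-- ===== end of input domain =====

-- B inverts A's loop nesting (plugins outer, first-match dict, then one emission pass); same return value.
-- Both Pythons mutate autoscan_report identically (B appends the same report lines); the theorems below are
-- about the RETURN value only, which does not depend on autoscan_report.

-- ===== PORT A =====
-- _convert_to_lowercase: {key.lower(): value for key, value in data.items()}
def pvLowerDict (d : List (String × String)) : PySem.Dict String String :=
  d.foldl (fun acc kv => acc.insert (PySem.Str.lower kv.1) kv.2) PySem.Dict.empty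

-- A's inner loop: first plugin whose (lowered) name contains mod_name, with its id; break
def pvFirstPluginId : List (String × String) → String → Option String
  | [], _ => none
  | (pn, pid) :: rest, m => if PySem.Str.isIn m pn then some pid else pvFirstPluginId rest m

-- A's outer loop; 'none' is exactly the ValueError from _validate_warning (excluded by Pre_)
def pvScanA (plugins : List (String × String)) : List (String × String) → Bool → Option Bool
  | [], found => some found
  | (m, w) :: rest, found =>
    match pvFirstPluginId plugins m with
    | none => pvScanA plugins rest found
    | some _ => if w = "" then none else pvScanA plugins rest true

def detect_mods_single (yaml_dict : List (String × String)) (crashlog_plugins : List (String × String)) (autoscan_report : List String) : Bool :=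
  (pvScanA (pvLowerDict crashlog_plugins).items (pvLowerDict yaml_dict).items false).getD false

-- ===== PORT B =====
-- plugins outer, mods inner: first_match[mod] := id of the first plugin whose name contains mod
def pvFirstMatch (mods : List (String × String)) (plugins : List (String × String)) : PySem.Dict String String :=
  plugins.foldl (fun fm pv =>
    mods.foldl (fun fm mv =>
      if !(PySem.Dict.contains fm mv.1) && PySem.Str.isIn mv.1 pv.1 then PySem.Dict.insert fm mv.1 pv.2 else fm) fm)
    PySem.Dict.empty

-- B's emission pass; 'none' is exactly B's ValueError (excluded by Pre_)
def pvEmitB (fm : PySem.Dict String String) : List (String × String) → Bool → Option Bool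
  | [], found => some found
  | (m, w) :: rest, found =>
    if PySem.Dict.contains fm m then (if w = "" then none else pvEmitB fm rest true)
    else pvEmitB fm rest found

def detect_mods_single_alt (yaml_dict : List (String × String)) (crashlog_plugins : List (String × String)) (autoscan_report : List String) : Bool :=
  let ml := pvLowerDict yaml_dict
  let pl := pvLowerDict crashlog_plugins
  (pvEmitB (pvFirstMatch ml.items pl.items) ml.items false).getD false

-- ===== PRECONDITION & SPEC =====
-- A raises ValueError exactly when some lowered mod with an empty warning occurs in some lowered plugin name.
def Pre_detect_mods_single (yaml_dict : List (String × String)) (crashlog_plugins : List (String × String)) (autoscan_report : List String) : Prop :=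
  ∀ kv ∈ (pvLowerDict yaml_dict).items, kv.2 = "" →
    ∀ pv ∈ (pvLowerDict crashlog_plugins).items, PySem.Str.isIn kv.1 pv.1 = false
instance (yaml_dict : List (String × String)) (crashlog_plugins : List (String × String)) (autoscan_report : List String) : Decidable (Pre_detect_mods_single yaml_dict crashlog_plugins autoscan_report) := by unfold Pre_detect_mods_single; infer_instance
def pvWitness_detect_mods_single : (List (String × String)) × (List (String × String)) × List String :=
  ([("ModA", "warn about ModA")], [("ModA.esp", "01"), ("Other.esp", "02")], [])

def Spec_detect_mods_single (yaml_dict : List (String × String)) (crashlog_plugins : List (String × String)) (autoscan_report : List String) (out : Bool) : Prop := out = detect_mods_single_alt yaml_dict crashlog_plugins autoscan_report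
instance (yaml_dict : List (String × String)) (crashlog_plugins : List (String × String)) (autoscan_report : List String) (out : Bool) : Decidable (Spec_detect_mods_single yaml_dict crashlog_plugins autoscan_report out) := by unfold Spec_detect_mods_single; infer_instance

-- ===== CLAIM (what is proved, stated in full; the proofs are below) =====
def Claim_equal_detect_mods_single : Prop := ∀ (yaml_dict : List (String × String)) (crashlog_plugins : List (String × String)) (autoscan_report : List String), Dom_detect_mods_single yaml_dict crashlog_plugins autoscan_report → Pre_detect_mods_single yaml_dict crashlog_plugins autoscan_report → Spec_detect_mods_single yaml_dict crashlog_plugins autoscan_report (detect_mods_single yaml_dict crashlog_plugins autoscan_report)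

-- ===== LEMMAS AND PROOFS =====

-- inner fold of pvFirstMatch at one plugin: it marks m matched iff m is a mod key and pv.1 contains m
theorem pv_inner_contains (L : List (String × String)) (pv : String × String) (fm : PySem.Dict String String) (m : String) :
    (L.foldl (fun fm mv => if !(PySem.Dict.contains fm mv.1) && PySem.Str.isIn mv.1 pv.1 then PySem.Dict.insert fm mv.1 pv.2 else fm) fm).contains m
      = (fm.contains m || (decide (m ∈ L.map Prod.fst) && PySem.Str.isIn m pv.1)) := by
  induction L generalizing fm with
  | nil => simp
  | cons kv rest ih =>
    simp only [List.foldl_cons, ih]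
    by_cases hkm : kv.1 = m
    · subst hkm
      by_cases hc : fm.contains kv.1 <;> by_cases hs : PySem.Str.isIn kv.1 pv.1 = true <;>
        simp_all [PySem.Dict.contains_insert_self]
    · have h1 : (if !(PySem.Dict.contains fm kv.1) && PySem.Str.isIn kv.1 pv.1 then PySem.Dict.insert fm kv.1 pv.2 else fm).contains m = fm.contains m := by
        split
        · rw [PySem.Dict.contains_insert]
          simp [Ne.symm hkm]
        · rfl
      rw [h1]
      have h2 : (m ∈ List.map Prod.fst (kv :: rest)) ↔ (m ∈ List.map Prod.fst rest) := by
        rw [List.map_cons, List.mem_cons]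
        exact or_iff_right (fun h => hkm h.symm)
      rw [decide_eq_decide.mpr h2]
-- the whole pvFirstMatch fold: m is matched iff m is a mod key and A's inner scan finds a plugin
theorem pv_outer_contains (mods : List (String × String)) (pl : List (String × String)) (fm : PySem.Dict String String) (m : String) :
    (pl.foldl (fun fm pv => mods.foldl (fun fm mv => if !(PySem.Dict.contains fm mv.1) && PySem.Str.isIn mv.1 pv.1 then PySem.Dict.insert fm mv.1 pv.2 else fm) fm) fm).contains m
      = (fm.contains m || (decide (m ∈ mods.map Prod.fst) && (pvFirstPluginId pl m).isSome)) := by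
  induction pl generalizing fm with
  | nil => simp [pvFirstPluginId]
  | cons pv rest ih =>
    simp only [List.foldl_cons, ih, pv_inner_contains, pvFirstPluginId]
    by_cases hc : fm.contains m <;> by_cases hmem : m ∈ mods.map Prod.fst <;>
      by_cases hs : PySem.Str.isIn m pv.1 = true <;> simp_all

theorem pv_firstMatch_contains (mods pl : List (String × String)) (m : String) (hm : m ∈ mods.map Prod.fst) :
    (pvFirstMatch mods pl).contains m = (pvFirstPluginId pl m).isSome := by
  unfold pvFirstMatch
  rw [pv_outer_contains]
  simp [hm]

-- the two passes agree step for step once contains agrees with A's inner scan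
theorem pv_scan_emit (fmKeys : List String) (pl : List (String × String)) (fm : PySem.Dict String String)
    (H : ∀ m, m ∈ fmKeys → fm.contains m = (pvFirstPluginId pl m).isSome)
    (l : List (String × String)) (hl : ∀ kv ∈ l, kv.1 ∈ fmKeys) (found : Bool) :
    pvScanA pl l found = pvEmitB fm l found := by
  induction l generalizing found with
  | nil => rfl
  | cons kv rest ih =>
    obtain ⟨m, w⟩ := kv
    have hm : m ∈ fmKeys := hl (m, w) (by simp)
    have hrest : ∀ kv ∈ rest, kv.1 ∈ fmKeys := fun kv hkv => hl kv (by simp [hkv])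
    simp only [pvScanA, pvEmitB, H m hm]
    cases hfp : pvFirstPluginId pl m with
    | none => simpa [hfp] using ih hrest found
    | some pid =>
      simp only [Option.isSome_some, if_true]
      split
      · rfl
      · exact ih hrest true

-- ===== VERDICT (by name: the statement is the Claim_ definition above) =====
theorem detect_mods_single_spec : Claim_equal_detect_mods_single := by
  intro yaml_dict crashlog_plugins autoscan_report _ _
  unfold Spec_detect_mods_single detect_mods_single detect_mods_single_alt
  have h := pv_scan_emit ((pvLowerDict yaml_dict).items.map Prod.fst)
    (pvLowerDict crashlog_plugins).items
    (pvFirstMatch (pvLowerDict yaml_dict).items (pvLowerDict crashlog_plugins).items)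
    (fun m hm => pv_firstMatch_contains _ _ m hm)
    (pvLowerDict yaml_dict).items
    (fun kv hkv => List.mem_map_of_mem hkv)
    false
  simp only [h]
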